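-- pv_equiv track=rewrite | github.com/tkxksdl2/algorithm-programers | kakao/가사 검색/solution.py | get_wordslen_idx
-- ===== SOURCE A (Python) =====
-- def get_wordslen_idx(words):
--     w_len = 0
--     lenthup_idxs = {0:[0]}
--
--     for w in words:
--         if len(w) > w_len:
--             lenthup_idxs[len(w)] = [words.index(w)]
--             lenthup_idxs[w_len] += [words.index(w)]
--             w_len = len(w)
--     lenthup_idxs[w_len] += [len(words)]
--
--     return lenthup_idxs
-- ===== SOURCE B (Python) =====
-- def get_wordslen_idx(words):
--     # Declarative two-phase rebuild: a word starts a new group exactly when it is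
--     # strictly longer than every word before it; collect those indices, then pair
--     # keys with consecutive boundaries.
--     lens = [len(w) for w in words]
--     rec = [i for i in range(len(words)) if lens[i] > max(lens[:i], default=0)]
--     keys = [0] + [lens[i] for i in rec]
--     cuts = [0] + rec + [len(words)]
--     return {k: [s, e] for k, s, e in zip(keys, cuts, cuts[1:])}
-- ===== Notes on version B (the rewrite author's own statement) =====
-- stated objective: alternative
-- what changed: A's single stateful pass (running max, dict mutation and repeated words.index scans) is replaced by a declarative two-phase rebuild: a per-index prefix-maximum test (max(lens[:i], default=0)) selects the group-start indices, and the result dict is assembled by zipping the keys with consecutive boundaries.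
import Mathlib
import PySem

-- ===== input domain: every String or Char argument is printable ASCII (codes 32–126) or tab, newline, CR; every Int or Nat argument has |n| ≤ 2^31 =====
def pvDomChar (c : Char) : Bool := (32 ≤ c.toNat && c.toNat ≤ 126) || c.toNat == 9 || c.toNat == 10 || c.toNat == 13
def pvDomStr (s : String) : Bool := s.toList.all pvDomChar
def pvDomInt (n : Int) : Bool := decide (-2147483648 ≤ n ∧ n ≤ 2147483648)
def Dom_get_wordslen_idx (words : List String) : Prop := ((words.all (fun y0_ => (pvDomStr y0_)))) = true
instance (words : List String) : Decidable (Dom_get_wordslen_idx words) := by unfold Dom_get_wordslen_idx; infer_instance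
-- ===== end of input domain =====

-- B replaces A's stateful running-max loop (with repeated words.index scans and dict mutation) by a
-- declarative two-phase rebuild: per-index prefix-maximum tests select the group-start indices, and
-- the result dict is assembled by zipping keys with consecutive boundaries (objective: alternative).


-- ===== PORT A =====
-- the for-loop of A: recursion over the remaining words; `words` stays whole for words.index(w).
-- words.index(w) → (PySem.List.index? words w).getD 0 : always found here since w ∈ words, so the
-- .getD 0 totalisation is never taken where Python would raise.
-- lenthup_idxs[w_len] += [..] → Dict.modify w_len [] (· ++ [..]): the key is always present, so the
-- [] default is never used where Python would raise KeyError.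
def pvAloop (words rest : List String) (w_len : Int) (d : PySem.Dict Int (List Int)) :
    Int × PySem.Dict Int (List Int) :=
  match rest with
  | [] => (w_len, d)
  | w :: rs =>
    if PySem.Str.len w > w_len then
      let idx : Int := ((PySem.List.index? words w).getD 0 : Nat)
      pvAloop words rs (PySem.Str.len w)
        ((d.insert (PySem.Str.len w) [idx]).modify w_len [] (fun v => v ++ [idx]))
    else pvAloop words rs w_len d

def get_wordslen_idx (words : List String) : List (Int × List Int) :=
  let r := pvAloop words words 0 (PySem.Dict.mk [(0, [0])])
  ((r.2).modify r.1 [] (fun v => v ++ [PySem.List.len words])).items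

-- ===== PORT B =====
-- Source B, line for line: lens, then the prefix-maximum filter over range(len(words)) (lens[i] is
-- in range since i comes from range(len); max(lens[:i], default=0) is PySem.List.maxD), then
-- keys/cuts, then the dict comprehension over zip(keys, cuts, cuts[1:]) as a fold of inserts.
def get_wordslen_idx_alt (words : List String) : List (Int × List Int) :=
  let lens := words.map PySem.Str.len
  let rec_ := (PySem.List.pyRange 0 (PySem.List.len words) 1).filter
      (fun i => decide (PySem.List.pyGetD lens i 0 >
        PySem.List.maxD (PySem.List.slice lens none (some i)) (fun x => x) 0))
  let keys := (0 : Int) :: rec_.map (fun i => PySem.List.pyGetD lens i 0)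
  let cuts := (0 : Int) :: (rec_ ++ [PySem.List.len words])
  ((keys.zip (cuts.zip (cuts.drop 1))).foldl
      (fun d p => d.insert p.1 [p.2.1, p.2.2]) PySem.Dict.empty).items

-- ===== PRECONDITION & SPEC =====
def Spec_get_wordslen_idx (words : List String) (out : List (Int × List Int)) : Prop := out = get_wordslen_idx_alt words
instance (words : List String) (out : List (Int × List Int)) : Decidable (Spec_get_wordslen_idx words out) := by unfold Spec_get_wordslen_idx; infer_instance

-- ===== CLAIM (what is proved, stated in full; the proofs are below) =====
def Claim_equal_get_wordslen_idx : Prop := ∀ (words : List String), Dom_get_wordslen_idx words → Spec_get_wordslen_idx words (get_wordslen_idx words)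

-- ===== LEMMAS AND PROOFS =====

-- reference record scan (proof-side): state of A's loop as a boundary table
def pvBscan (rest : List String) (i m : Int) (t : List (Int × Int)) : Int × List (Int × Int) :=
  match rest with
  | [] => (m, t)
  | w :: rs =>
    if PySem.Str.len w > m then
      pvBscan rs (i + 1) (PySem.Str.len w) (t ++ [(PySem.Str.len w, i)])
    else pvBscan rs (i + 1) m t

-- the record pairs (length, index) the scan appends
def pvRecs (rest : List String) (i m : Int) : List (Int × Int) :=
  match rest with
  | [] => []
  | w :: rs =>
    if PySem.Str.len w > m then (PySem.Str.len w, i) :: pvRecs rs (i + 1) (PySem.Str.len w)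
    else pvRecs rs (i + 1) m

-- max(xs, default=0)
def pvM (xs : List Int) : Int := PySem.List.maxD xs (fun x => x) 0

-- body of the rendered dict: each record paired with the start of the next record
def pvRbody : List (Int × Int) → Int → Int → List (Int × List Int)
  | [], _, _ => []
  | (l, x) :: ts, m, s => (l, [x, (ts.headD (m, s)).2]) :: pvRbody ts m s

theorem pvRbody_snoc (t0 : List (Int × Int)) (m s l i : Int) :
    pvRbody (t0 ++ [(m, s)]) l i = pvRbody t0 m s ++ [(m, [s, i])] := by
  induction t0 with
  | nil => simp [pvRbody]
  | cons p ts ih =>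
    obtain ⟨a, b⟩ := p
    simp only [List.cons_append, pvRbody, ih]
    cases ts <;> simp [pvRbody]

theorem pvRbody_keys (t0 : List (Int × Int)) (m s : Int) :
    (pvRbody t0 m s).map Prod.fst = t0.map Prod.fst := by
  induction t0 with
  | nil => simp [pvRbody]
  | cons p ts ih => obtain ⟨a, b⟩ := p; simp [pvRbody, ih]

-- getD on a dict whose key m sits after a prefix without m
theorem pvDict_getD_mid (L0 L1 : List (Int × List Int)) (m : Int) (v : List Int)
    (h0 : m ∉ L0.map Prod.fst) :
    (PySem.Dict.mk (L0 ++ (m, v) :: L1)).getD m [] = v := by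
  induction L0 with
  | nil =>
    simp [PySem.Dict.getD_eq_get?_getD, PySem.Dict.get?_mk_cons]
  | cons p L ih =>
    obtain ⟨a, b⟩ := p
    have hne : (a == m) = false := by
      simp only [List.map_cons, List.mem_cons] at h0
      simp; intro h; exact h0 (Or.inl h.symm)
    have h0' : m ∉ L.map Prod.fst := fun h => h0 (by simp [h])
    rw [PySem.Dict.getD_eq_get?_getD] at ih ⊢
    show (((PySem.Dict.mk ((a, b) :: (L ++ (m, v) :: L1))).get? m).getD []) = v
    rw [PySem.Dict.get?_mk_cons, hne]
    exact ih h0'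

theorem pvDict_contains_of_not_mem (L : List (Int × List Int)) (k : Int)
    (h : k ∉ L.map Prod.fst) : (PySem.Dict.mk L).contains k = false := by
  rw [PySem.Dict.contains_eq_decide_mem_keys]
  simpa [PySem.Dict.keys] using h

theorem pvDict_contains_of_mem (L : List (Int × List Int)) (k : Int)
    (h : k ∈ L.map Prod.fst) : (PySem.Dict.mk L).contains k = true := by
  rw [PySem.Dict.contains_eq_decide_mem_keys]
  simpa [PySem.Dict.keys] using h

-- modify at a key occurring exactly once, in the middle
theorem pvDict_modify_mid (L0 L1 : List (Int × List Int)) (m : Int) (v : List Int)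
    (f : List Int → List Int) (h0 : m ∉ L0.map Prod.fst) (h1 : m ∉ L1.map Prod.fst) :
    ((PySem.Dict.mk (L0 ++ (m, v) :: L1)).modify m [] f).items
      = L0 ++ (m, f v) :: L1 := by
  have hget := pvDict_getD_mid L0 L1 m v h0
  have hc : (PySem.Dict.mk (L0 ++ (m, v) :: L1)).contains m = true :=
    pvDict_contains_of_mem _ _ (by simp)
  show ((PySem.Dict.mk (L0 ++ (m, v) :: L1)).insert m (f ((PySem.Dict.mk (L0 ++ (m, v) :: L1)).getD m []))).items = _
  rw [hget, PySem.Dict.items_insert, hc, if_pos rfl]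
  show (L0 ++ (m, v) :: L1).map _ = _
  rw [List.map_append, List.map_cons]
  have hid : ∀ (L : List (Int × List Int)), m ∉ L.map Prod.fst →
      L.map (fun p => if (p.1 == m) = true then (m, f v) else p) = L := by
    intro L hL
    have : ∀ p ∈ L, (fun p : Int × List Int => if (p.1 == m) = true then (m, f v) else p) p = id p := by
      intro p hp
      have : p.1 ≠ m := by
        intro h; exact hL (by simpa [← h] using List.mem_map_of_mem (f := Prod.fst) hp)
      simp [this]
    rw [List.map_congr_left this, List.map_id]
  rw [hid L0 h0, hid L1 h1]
  simp


-- the scan is "append the records"; its final max is the last record length (as a fold)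
theorem pvBscan_split (rest : List String) : ∀ (i m : Int) (t : List (Int × Int)),
    pvBscan rest i m t = ((pvRecs rest i m).foldl (fun _ p => p.1) m, t ++ pvRecs rest i m) := by
  induction rest with
  | nil => intro i m t; simp [pvBscan, pvRecs]
  | cons w rs ih =>
    intro i m t
    rw [pvBscan, pvRecs]
    by_cases h : PySem.Str.len w > m
    · rw [if_pos h, if_pos h, ih]; simp
    · rw [if_neg h, if_neg h, ih]

theorem pvM_append_singleton (xs : List Int) (a : Int) (ha : 0 ≤ a) :
    pvM (xs ++ [a]) = max (pvM xs) a := by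
  cases xs with
  | nil =>
    simp [pvM, PySem.List.maxD_nil, PySem.List.maxD_id_cons]
    omega
  | cons x t =>
    show pvM (x :: (t ++ [a])) = max (pvM (x :: t)) a
    simp [pvM, PySem.List.maxD_id_cons, List.foldl_append]

-- the records of the suffix starting at k are exactly B's filtered indices ≥ k, paired with their lengths
theorem pvRecs_spec (words : List String) : ∀ (rest : List String) (k : Nat),
    words.drop k = rest →
    pvRecs rest (k : Int) (pvM ((words.map PySem.Str.len).take k)) =
      ((PySem.List.pyRange (k : Int) (PySem.List.len words) 1).filter
        (fun i => decide (PySem.List.pyGetD (words.map PySem.Str.len) i 0 >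
          pvM (PySem.List.slice (words.map PySem.Str.len) none (some i))))).map
        (fun i => (PySem.List.pyGetD (words.map PySem.Str.len) i 0, i)) := by
  intro rest
  induction rest with
  | nil =>
    intro k hk
    have hlen : words.length ≤ k := by
      have := congrArg List.length hk
      simp at this
      omega
    rw [pvRecs, PySem.List.pyRange_one_eq_nil (by rw [PySem.List.len_eq]; exact_mod_cast hlen)]
    simp
  | cons w rs ih =>
    intro k hk
    have hklt : k < words.length := by
      have := congrArg List.length hk
      simp at this
      omega
    have hdk := List.drop_eq_getElem_cons hklt
    rw [hk] at hdk
    injection hdk with h1 h2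
    have hw : words[k] = w := h1.symm
    have hrs : words.drop (k + 1) = rs := h2.symm
    have hlenk : k < (words.map PySem.Str.len).length := by simpa using hklt
    have hgd : PySem.List.pyGetD (words.map PySem.Str.len) (k : Int) 0 = PySem.Str.len w := by
      rw [PySem.List.pyGetD_natCast, List.getD_eq_getElem _ _ hlenk]
      simp [hw]
    have hsl : PySem.List.slice (words.map PySem.Str.len) none (some (k : Int))
        = (words.map PySem.Str.len).take k := PySem.List.slice_to_natCast _ _
    have htk : (words.map PySem.Str.len).take (k + 1)
        = (words.map PySem.Str.len).take k ++ [PySem.Str.len w] := by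
      rw [List.take_add_one, List.getElem?_eq_getElem hlenk]
      simp [hw]
    have hrange : PySem.List.pyRange (k : Int) (PySem.List.len words) 1
        = (k : Int) :: PySem.List.pyRange ((k : Int) + 1) (PySem.List.len words) 1 := by
      apply PySem.List.pyRange_one_cons
      rw [PySem.List.len_eq]; exact_mod_cast hklt
    have hstep : ((k : Int) + 1) = ((k + 1 : Nat) : Int) := by push_cast; ring
    have hwnn : (0 : Int) ≤ PySem.Str.len w := by
      rw [PySem.Str.len_eq]; positivity
    rw [pvRecs, hrange]
    by_cases h : PySem.Str.len w > pvM ((words.map PySem.Str.len).take k)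
    · rw [if_pos h]
      have hfc : List.filter
          (fun i => decide (PySem.List.pyGetD (words.map PySem.Str.len) i 0 >
            pvM (PySem.List.slice (words.map PySem.Str.len) none (some i))))
          (((k : Nat) : Int) :: PySem.List.pyRange (((k : Nat) : Int) + 1) (PySem.List.len words) 1)
          = ((k : Nat) : Int) :: List.filter
          (fun i => decide (PySem.List.pyGetD (words.map PySem.Str.len) i 0 >
            pvM (PySem.List.slice (words.map PySem.Str.len) none (some i))))
          (PySem.List.pyRange (((k : Nat) : Int) + 1) (PySem.List.len words) 1) :=
        List.filter_cons_of_pos (by simp only [hgd, hsl]; exact decide_eq_true h)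
      rw [hfc, List.map_cons, hgd]
      congr 1
      have hM : pvM ((words.map PySem.Str.len).take (k + 1)) = PySem.Str.len w := by
        rw [htk, pvM_append_singleton _ _ hwnn]; omega
      rw [hstep, ← hM]
      exact ih (k + 1) hrs
    · rw [if_neg h]
      have hfc : List.filter
          (fun i => decide (PySem.List.pyGetD (words.map PySem.Str.len) i 0 >
            pvM (PySem.List.slice (words.map PySem.Str.len) none (some i))))
          (((k : Nat) : Int) :: PySem.List.pyRange (((k : Nat) : Int) + 1) (PySem.List.len words) 1)
          = List.filter
          (fun i => decide (PySem.List.pyGetD (words.map PySem.Str.len) i 0 >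
            pvM (PySem.List.slice (words.map PySem.Str.len) none (some i))))
          (PySem.List.pyRange (((k : Nat) : Int) + 1) (PySem.List.len words) 1) :=
        List.filter_cons_of_neg
          (by simp only [hgd, hsl]; exact fun hc => h (of_decide_eq_true hc))
      rw [hfc]
      have hM : pvM ((words.map PySem.Str.len).take (k + 1))
          = pvM ((words.map PySem.Str.len).take k) := by
        rw [htk, pvM_append_singleton _ _ hwnn]; omega
      rw [hstep, ← hM]
      exact ih (k + 1) hrs

-- zip(keys, cuts, cuts[1:]) over a table with start sentinel renders pvRbody plus the closing entry
theorem pvZip3_render (ts : List (Int × Int)) (m s n : Int) :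
    (((ts ++ [(m, s)]).map Prod.fst).zip
      ((((ts ++ [(m, s)]).map Prod.snd) ++ [n]).zip
        ((((ts ++ [(m, s)]).map Prod.snd) ++ [n]).drop 1))).map
      (fun p => ((p.1, [p.2.1, p.2.2]) : Int × List Int))
    = pvRbody ts m s ++ [(m, [s, n])] := by
  induction ts with
  | nil => simp [pvRbody]
  | cons p ts ih =>
    obtain ⟨a, b⟩ := p
    cases ts with
    | nil => simp [pvRbody]
    | cons q ts' => simpa [pvRbody] using ih

-- a fold of inserts with pairwise-distinct keys lists the pairs in order
theorem pvFoldInsert (ps : List (Int × Int × Int)) :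
    ∀ (L : List (Int × List Int)),
    (L.map Prod.fst ++ ps.map Prod.fst).Nodup →
    (ps.foldl (fun d p => d.insert p.1 [p.2.1, p.2.2]) (PySem.Dict.mk L)).items
      = L ++ ps.map (fun p => ((p.1, [p.2.1, p.2.2]) : Int × List Int)) := by
  induction ps with
  | nil => intro L _; simp
  | cons p ps ih =>
    intro L hnd
    have hfresh : (PySem.Dict.mk L).contains p.1 = false := by
      apply pvDict_contains_of_not_mem
      intro hmem
      rw [List.nodup_append] at hnd
      exact hnd.2.2 p.1 hmem p.1 (by simp) rfl
    have hins : (PySem.Dict.mk L).insert p.1 [p.2.1, p.2.2]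
        = PySem.Dict.mk (L ++ [(p.1, [p.2.1, p.2.2])]) := by
      apply PySem.Dict.ext
      rw [PySem.Dict.items_insert, hfresh]
      simp
    rw [List.foldl_cons, hins, ih]
    · simp
    · simp only [List.map_append, List.map_cons, List.map_nil] at hnd ⊢
      simpa [List.append_assoc] using hnd

-- main loop correspondence: A's dict state renders B's boundary table
theorem pvMain (rest : List String) : ∀ (pre : List String) (m s : Int) (t0 : List (Int × Int)),
    (∀ u ∈ pre, PySem.Str.len u ≤ m) →
    List.Pairwise (· < ·) ((t0 ++ [(m, s)]).map Prod.fst) →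
    ∃ t0' m' s',
      pvBscan rest (pre.length : Int) m (t0 ++ [(m, s)]) = (m', t0' ++ [(m', s')]) ∧
      pvAloop (pre ++ rest) rest m (PySem.Dict.mk (pvRbody t0 m s ++ [(m, [s])]))
        = (m', PySem.Dict.mk (pvRbody t0' m' s' ++ [(m', [s'])])) ∧
      List.Pairwise (· < ·) ((t0' ++ [(m', s')]).map Prod.fst) := by
  induction rest with
  | nil =>
    intro pre m s t0 _ h2
    exact ⟨t0, m, s, rfl, rfl, h2⟩
  | cons w rs ih =>
    intro pre m s t0 h1 h2
    have hkeys : ((t0 ++ [(m, s)]).map Prod.fst) = t0.map Prod.fst ++ [m] := by simp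
    rw [hkeys] at h2
    have hallm : ∀ a ∈ t0.map Prod.fst, a < m := by
      rw [List.pairwise_append] at h2
      intro a ha; exact h2.2.2 a ha m (by simp)
    by_cases hlm : PySem.Str.len w > m
    · -- the new longest word: both sides extend the table / dict
      have hwnotin : w ∉ pre := fun hw => absurd (h1 w hw) (not_le.mpr hlm)
      have hidx : PySem.List.index? (pre ++ w :: rs) w = some pre.length := by
        clear h1 h2 hkeys hallm ih
        induction pre with
        | nil => simpa using PySem.List.index?_cons_self w rs
        | cons u us ihp =>
          have hu : u ≠ w := fun h => hwnotin (by simp [h])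
          rw [List.cons_append, PySem.List.index?_cons_of_ne _ hu,
            ihp (fun h => hwnotin (by simp [h]))]
          simp
      have h1' : ∀ u ∈ pre ++ [w], PySem.Str.len u ≤ PySem.Str.len w := by
        intro u hu
        rcases List.mem_append.mp hu with h | h
        · exact le_of_lt (lt_of_le_of_lt (h1 u h) hlm)
        · simp at h; subst h; exact le_refl _
      have hlt : ∀ a ∈ List.map Prod.fst t0 ++ [m], a < PySem.Str.len w := by
        intro a ha
        rcases List.mem_append.mp ha with h | h
        · exact lt_trans (hallm a h) hlm
        · rw [List.mem_singleton] at h; subst h; exact hlm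
      have h2' : List.Pairwise (· < ·)
          (((t0 ++ [(m, s)]) ++ [(PySem.Str.len w, (pre.length : Int))]).map Prod.fst) := by
        rw [List.map_append, List.pairwise_append, hkeys]
        refine ⟨hkeys ▸ h2, List.pairwise_singleton _ _, ?_⟩
        intro a ha b hb
        rw [List.map_cons, List.map_nil, List.mem_singleton] at hb
        subst hb
        exact hlt a ha
      -- A's dict step: insert the fresh key, then extend the old last key
      have hfresh : (PySem.Dict.mk (pvRbody t0 m s ++ [(m, [s])])).contains (PySem.Str.len w) = false := by
        apply pvDict_contains_of_not_mem
        simp only [List.map_append, pvRbody_keys, List.map_cons, List.map_nil]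
        intro hmem
        rcases List.mem_append.mp hmem with h | h
        · exact absurd (lt_trans (hallm _ h) hlm) (lt_irrefl _)
        · simp at h; exact absurd (h ▸ hlm) (lt_irrefl _)
      have hins : (PySem.Dict.mk (pvRbody t0 m s ++ [(m, [s])])).insert (PySem.Str.len w) [(pre.length : Int)]
          = PySem.Dict.mk (pvRbody t0 m s ++ (m, [s]) :: [(PySem.Str.len w, [(pre.length : Int)])]) := by
        apply PySem.Dict.ext
        rw [PySem.Dict.items_insert, hfresh]
        simp
      have hmod : (PySem.Dict.mk (pvRbody t0 m s ++ (m, [s]) :: [(PySem.Str.len w, [(pre.length : Int)])])).modify m []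
            (fun v => v ++ [(pre.length : Int)])
          = PySem.Dict.mk (pvRbody (t0 ++ [(m, s)]) (PySem.Str.len w) (pre.length : Int)
              ++ [(PySem.Str.len w, [(pre.length : Int)])]) := by
        apply PySem.Dict.ext
        rw [pvDict_modify_mid]
        · rw [pvRbody_snoc]; simp
        · rw [pvRbody_keys]; intro h; exact absurd (hallm m h) (lt_irrefl m)
        · simp; intro h; exact absurd (h ▸ hlm) (lt_irrefl _)
      obtain ⟨t0', m', s', hb, ha, hp⟩ :=
        ih (pre ++ [w]) (PySem.Str.len w) (pre.length : Int) (t0 ++ [(m, s)]) h1' h2'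
      have hlen : ((pre ++ [w]).length : Int) = (pre.length : Int) + 1 := by
        simp
      rw [hlen] at hb
      refine ⟨t0', m', s', ?_, ?_, hp⟩
      · show pvBscan (w :: rs) (pre.length : Int) m (t0 ++ [(m, s)]) = _
        rw [pvBscan, if_pos hlm]
        exact hb
      · show pvAloop (pre ++ w :: rs) (w :: rs) m _ = _
        rw [pvAloop, if_pos hlm, hidx]
        simp only [Option.getD_some]
        rw [hins, hmod, show pre ++ w :: rs = (pre ++ [w]) ++ rs by simp]
        exact ha
    · -- not longer: both sides skip the word
      have h1' : ∀ u ∈ pre ++ [w], PySem.Str.len u ≤ m := by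
        intro u hu
        rcases List.mem_append.mp hu with h | h
        · exact h1 u h
        · simp at h; subst h; exact le_of_not_gt hlm
      obtain ⟨t0', m', s', hb, ha, hp⟩ := ih (pre ++ [w]) m s t0 h1' (by rw [hkeys]; exact h2)
      refine ⟨t0', m', s', ?_, ?_, hp⟩
      · show pvBscan (w :: rs) (pre.length : Int) m (t0 ++ [(m, s)]) = _
        have hlen : ((pre ++ [w]).length : Int) = (pre.length : Int) + 1 := by simp
        rw [hlen] at hb
        rw [pvBscan, if_neg hlm]
        exact hb
      · show pvAloop (pre ++ w :: rs) (w :: rs) m _ = _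
        rw [pvAloop, if_neg hlm]
        rw [show pre ++ w :: rs = (pre ++ [w]) ++ rs by simp]
        exact ha

theorem get_wordslen_idx_spec : Claim_equal_get_wordslen_idx := by
  intro words _
  show get_wordslen_idx words = get_wordslen_idx_alt words
  obtain ⟨t0', m', s', hb, ha, hp⟩ :=
    pvMain words [] 0 0 [] (by simp) (by simp)
  simp only [List.length_nil, Nat.cast_zero, List.nil_append, pvRbody] at hb ha
  -- identify the scan's table with the record list
  rw [pvBscan_split] at hb
  have htab : t0' ++ [(m', s')] = (0, 0) :: pvRecs words 0 0 := by
    have := congrArg Prod.snd hb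
    simpa using this.symm
  -- the record list is B's filtered index list, paired with its lengths
  have hrec := pvRecs_spec words words 0 rfl
  simp only [Nat.cast_zero, List.take_zero, pvM, PySem.List.maxD_nil] at hrec
  -- key facts from the pairwise table
  have hkeys : ((t0' ++ [(m', s')]).map Prod.fst) = t0'.map Prod.fst ++ [m'] := by simp
  have hallm : ∀ a ∈ t0'.map Prod.fst, a < m' := by
    rw [hkeys, List.pairwise_append] at hp
    intro a hx; exact hp.2.2 a hx m' (by simp)
  have hnotin : m' ∉ t0'.map Prod.fst := fun h => absurd (hallm m' h) (lt_irrefl m')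
  -- A's side: the final modify renders the closing entry
  have hA : get_wordslen_idx words
      = pvRbody t0' m' s' ++ [(m', [s', PySem.List.len words])] := by
    show (((pvAloop words words 0 (PySem.Dict.mk [(0, [0])])).2).modify
        (pvAloop words words 0 (PySem.Dict.mk [(0, [0])])).1 []
        (fun v => v ++ [PySem.List.len words])).items = _
    rw [ha]
    exact (pvDict_modify_mid (pvRbody t0' m' s') [] m' [s'] _
      (by rw [pvRbody_keys]; exact hnotin) (by simp)).trans (by simp)
  rw [hA]
  -- B's side
  simp only [get_wordslen_idx_alt]
  have hF1 : ((PySem.List.pyRange 0 (PySem.List.len words) 1).filter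
      (fun i => decide (PySem.List.pyGetD (words.map PySem.Str.len) i 0 >
        PySem.List.maxD (PySem.List.slice (words.map PySem.Str.len) none (some i)) (fun x => x) 0)))
      = (pvRecs words 0 0).map Prod.snd := by
    rw [hrec, List.map_map,
      show (Prod.snd ∘ fun i : Int => ((PySem.List.pyGetD (words.map PySem.Str.len) i 0 : Int), i)) = id from rfl,
      List.map_id]
    rfl
  have hF2 : ((PySem.List.pyRange 0 (PySem.List.len words) 1).filter
      (fun i => decide (PySem.List.pyGetD (words.map PySem.Str.len) i 0 >
        PySem.List.maxD (PySem.List.slice (words.map PySem.Str.len) none (some i)) (fun x => x) 0))).map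
        (fun i => PySem.List.pyGetD (words.map PySem.Str.len) i 0)
      = (pvRecs words 0 0).map Prod.fst := by
    rw [hrec, List.map_map]; rfl
  rw [hF2, hF1]
  have hk2 : (0 : Int) :: (pvRecs words 0 0).map Prod.fst
      = (t0' ++ [(m', s')]).map Prod.fst := by
    rw [htab]; simp
  have hc2 : (0 : Int) :: ((pvRecs words 0 0).map Prod.snd ++ [PySem.List.len words])
      = (t0' ++ [(m', s')]).map Prod.snd ++ [PySem.List.len words] := by
    rw [htab]; simp
  rw [hk2, hc2]
  have hempty : (PySem.Dict.empty : PySem.Dict Int (List Int)) = PySem.Dict.mk [] := rfl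
  have hmapfst : ∀ (qs : List (Int × Int × Int)),
      qs.map Prod.fst = (qs.map (fun p => ((p.1, [p.2.1, p.2.2]) : Int × List Int))).map Prod.fst := by
    intro qs; rw [List.map_map]; rfl
  have hnodup : (([] : List (Int × List Int)).map Prod.fst
      ++ (((t0' ++ [(m', s')]).map Prod.fst).zip
        ((((t0' ++ [(m', s')]).map Prod.snd) ++ [PySem.List.len words]).zip
          ((((t0' ++ [(m', s')]).map Prod.snd) ++ [PySem.List.len words]).drop 1))).map Prod.fst).Nodup := by
    rw [List.map_nil, List.nil_append, hmapfst, pvZip3_render, List.map_append, pvRbody_keys]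
    have hone : ([(m', [s', PySem.List.len words])].map (Prod.fst (β := List Int))) = [m'] := by simp
    rw [hone]
    exact List.Pairwise.imp (fun h => ne_of_lt h) (hkeys ▸ hp)
  rw [hempty, pvFoldInsert _ [] hnodup, List.nil_append, pvZip3_render]
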